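-- pv_equiv track=rewrite | github.com/insominx/Link2Vid | video_downloader.py | error_hint
-- ===== SOURCE A (Python) =====
-- def error_hint(err_text):
--     msg = err_text.lower()
--     if any(k in msg for k in ["signature", "cipher", "extractor", "unable to extract"]):
--         return " (Hint: try updating yt-dlp.)"
--     if "ffmpeg" in msg:
--         return " (Hint: check ffmpeg is installed and on PATH.)"
--     if "javascript runtime" in msg or "js runtime" in msg:
--         return " (Hint: install deno or node and configure yt-dlp JS runtime.)"
--     if any(k in msg for k in ["403", "forbidden", "bot", "sign in", "age", "cookie", "consent"]):
--         return " (Hint: try cookies.txt from your browser.)"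
--     return ""
-- ===== SOURCE B (Python) =====
-- # B: a naive multi-pattern text scan.  Instead of asking, rule by rule, whether any
-- # keyword is a substring (A's first-match if-chain), B walks the lowered message
-- # position by position, checks which keywords START at each position, and keeps the
-- # smallest (highest-priority) rule index seen; at the end it indexes a hint table.
-- KEYWORDS = [
--     ("signature", 0), ("cipher", 0), ("extractor", 0), ("unable to extract", 0),
--     ("ffmpeg", 1),
--     ("javascript runtime", 2), ("js runtime", 2),
--     ("403", 3), ("forbidden", 3), ("bot", 3), ("sign in", 3), ("age", 3),
--     ("cookie", 3), ("consent", 3),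
-- ]
-- HINTS = [
--     " (Hint: try updating yt-dlp.)",
--     " (Hint: check ffmpeg is installed and on PATH.)",
--     " (Hint: install deno or node and configure yt-dlp JS runtime.)",
--     " (Hint: try cookies.txt from your browser.)",
-- ]
--
-- def error_hint(err_text):
--     msg = err_text.lower()
--     best = len(HINTS)
--     for i in range(len(msg) + 1):
--         for kw, rule in KEYWORDS:
--             if rule < best and msg.startswith(kw, i):
--                 best = rule
--     return HINTS[best] if best < len(HINTS) else ""
-- ===== Notes on version B (the rewrite author's own statement) =====
-- stated objective: alternative
-- what changed: B is a naive multi-pattern matcher: it scans the lowered message position by position, records the minimum rule index whose keyword starts at some position, and indexes a hint table, instead of A's rule-by-rule substring-membership if-chain.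
import Mathlib
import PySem

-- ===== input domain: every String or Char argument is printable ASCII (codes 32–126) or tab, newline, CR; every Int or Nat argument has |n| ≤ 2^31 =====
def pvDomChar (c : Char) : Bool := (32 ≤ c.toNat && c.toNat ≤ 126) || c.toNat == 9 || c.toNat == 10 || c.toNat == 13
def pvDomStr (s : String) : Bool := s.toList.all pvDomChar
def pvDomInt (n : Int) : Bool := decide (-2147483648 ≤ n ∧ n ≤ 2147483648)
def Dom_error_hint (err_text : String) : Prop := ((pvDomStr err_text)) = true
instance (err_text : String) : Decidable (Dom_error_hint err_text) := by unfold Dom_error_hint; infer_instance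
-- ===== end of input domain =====

set_option maxRecDepth 8192


-- B is a naive multi-pattern matcher: it scans the lowered message position by
-- position keeping the minimum rule index whose keyword starts there, then indexes
-- a hint table — an alternative algorithm to A's rule-by-rule substring if-chain.

-- ===== PORT A =====
def error_hint (err_text : String) : String :=
  let msg := PySem.Str.lower err_text
  if ["signature", "cipher", "extractor", "unable to extract"].any
      (fun k => PySem.Str.isIn k msg) then
    " (Hint: try updating yt-dlp.)"
  else if PySem.Str.isIn "ffmpeg" msg then
    " (Hint: check ffmpeg is installed and on PATH.)"
  else if PySem.Str.isIn "javascript runtime" msg || PySem.Str.isIn "js runtime" msg then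
    " (Hint: install deno or node and configure yt-dlp JS runtime.)"
  else if ["403", "forbidden", "bot", "sign in", "age", "cookie", "consent"].any
      (fun k => PySem.Str.isIn k msg) then
    " (Hint: try cookies.txt from your browser.)"
  else
    ""

-- ===== PORT B =====
def hintKeywords : List (String × Nat) :=
  [("signature", 0), ("cipher", 0), ("extractor", 0), ("unable to extract", 0),
   ("ffmpeg", 1),
   ("javascript runtime", 2), ("js runtime", 2),
   ("403", 3), ("forbidden", 3), ("bot", 3), ("sign in", 3), ("age", 3),
   ("cookie", 3), ("consent", 3)]

def hintTexts : List String :=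
  [" (Hint: try updating yt-dlp.)",
   " (Hint: check ffmpeg is installed and on PATH.)",
   " (Hint: install deno or node and configure yt-dlp JS runtime.)",
   " (Hint: try cookies.txt from your browser.)"]

-- Python's msg.startswith(kw, i) for 0 ≤ i is exactly "kw starts at offset i",
-- i.e. startswith on msg[i:], ported as Chars.startswith on (msg.drop i).
def error_hint_alt (err_text : String) : String :=
  let msg := (PySem.Str.lower err_text).toList
  let best := (List.range (msg.length + 1)).foldl
    (fun b i => hintKeywords.foldl
      (fun b kr =>
        if kr.2 < b ∧ PySem.Chars.startswith (msg.drop i) kr.1.toList then kr.2 else b)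
      b)
    hintTexts.length
  hintTexts.getD best ""

-- ===== PRECONDITION & SPEC =====
def Spec_error_hint (err_text : String) (out : String) : Prop := out = error_hint_alt err_text
instance (err_text : String) (out : String) : Decidable (Spec_error_hint err_text out) := by unfold Spec_error_hint; infer_instance

-- ===== CLAIM (what is proved, stated in full; the proofs are below) =====
def Claim_equal_error_hint : Prop := ∀ (err_text : String), Dom_error_hint err_text → Spec_error_hint err_text (error_hint err_text)

-- ===== LEMMAS AND PROOFS =====

-- the inner fold of B (over an arbitrary suffix of the keyword table)
def ehStepL (msg : List Char) (i : Nat) (l : List (String × Nat)) (b : Nat) : Nat :=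
  l.foldl
    (fun b kr =>
      if kr.2 < b ∧ PySem.Chars.startswith (msg.drop i) kr.1.toList then kr.2 else b) b

-- the outer fold of B (over an arbitrary list of positions)
def ehScan (msg : List Char) (l : List Nat) (b : Nat) : Nat :=
  l.foldl (fun b i => ehStepL msg i hintKeywords b) b

-- "some keyword of rule r occurs in msg"
def Matched (msg : List Char) (r : Nat) : Prop :=
  ∃ k, (k, r) ∈ hintKeywords ∧ ∃ i, k.toList <+: msg.drop i

theorem ehStepL_le_init (msg : List Char) (i : Nat) (l : List (String × Nat)) (b : Nat) :
    ehStepL msg i l b ≤ b := by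
  induction l generalizing b with
  | nil => simp [ehStepL]
  | cons kr tl ih =>
    simp only [ehStepL, List.foldl] at *
    split
    · exact le_trans (ih _) (by omega)
    · exact ih b

theorem ehStepL_le_of_mem (msg : List Char) (i : Nat) (l : List (String × Nat)) (b : Nat)
    (k : String) (r : Nat) (hm : (k, r) ∈ l)
    (hs : PySem.Chars.startswith (msg.drop i) k.toList = true) :
    ehStepL msg i l b ≤ r := by
  induction l generalizing b with
  | nil => simp at hm
  | cons kr tl ih =>
    simp only [List.mem_cons] at hm
    simp only [ehStepL, List.foldl] at *
    rcases hm with h | h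
    · subst h
      split
      · exact le_trans (ehStepL_le_init msg i tl _) (by omega)
      · rename_i hc
        simp [hs] at hc
        exact le_trans (ehStepL_le_init msg i tl _) (by omega)
    · exact ih _ h

theorem ehStepL_sound (msg : List Char) (i : Nat) (l : List (String × Nat)) (b : Nat) :
    ehStepL msg i l b = b ∨
      ∃ k, (k, ehStepL msg i l b) ∈ l ∧
        PySem.Chars.startswith (msg.drop i) k.toList = true := by
  induction l generalizing b with
  | nil => left; simp [ehStepL]
  | cons kr tl ih =>
    simp only [ehStepL, List.foldl] at *
    split
    · rename_i hc
      rcases ih kr.2 with h | ⟨k, hk, hs⟩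
      · right; exact ⟨kr.1, by simp [h], hc.2⟩
      · right; exact ⟨k, by simp [hk], hs⟩
    · rcases ih b with h | ⟨k, hk, hs⟩
      · left; exact h
      · right; exact ⟨k, by simp [hk], hs⟩

theorem ehScan_le_init (msg : List Char) (l : List Nat) (b : Nat) :
    ehScan msg l b ≤ b := by
  induction l generalizing b with
  | nil => simp [ehScan]
  | cons i tl ih =>
    simp only [ehScan, List.foldl] at *
    exact le_trans (ih _) (ehStepL_le_init msg i hintKeywords b)

theorem ehScan_le_of_mem (msg : List Char) (l : List Nat) (b : Nat)
    (i : Nat) (hi : i ∈ l) (k : String) (r : Nat) (hm : (k, r) ∈ hintKeywords)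
    (hs : PySem.Chars.startswith (msg.drop i) k.toList = true) :
    ehScan msg l b ≤ r := by
  induction l generalizing b with
  | nil => simp at hi
  | cons j tl ih =>
    simp only [List.mem_cons] at hi
    simp only [ehScan, List.foldl] at *
    rcases hi with h | h
    · subst h
      exact le_trans (ehScan_le_init msg tl _) (ehStepL_le_of_mem msg i hintKeywords b k r hm hs)
    · exact ih _ h

theorem ehScan_sound (msg : List Char) (l : List Nat) (b : Nat) :
    ehScan msg l b = b ∨ Matched msg (ehScan msg l b) := by
  induction l generalizing b with
  | nil => left; simp [ehScan]
  | cons i tl ih =>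
    simp only [ehScan, List.foldl] at *
    rcases ih (ehStepL msg i hintKeywords b) with h | h
    · rw [h]
      rcases ehStepL_sound msg i hintKeywords b with h2 | ⟨k, hk, hs⟩
      · left; exact h2
      · right
        exact ⟨k, hk, i, (PySem.Chars.startswith_iff _ _).mp hs⟩
    · right; exact h

-- a keyword occurs in msg iff it starts at some position i ≤ msg.length
theorem exists_pos_iff_isIn (msg k : List Char) :
    (∃ i, i < msg.length + 1 ∧ k <+: msg.drop i) ↔ PySem.Chars.isIn k msg = true := by
  rw [← PySem.Chars.exists_prefix_drop_iff_isIn]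
  constructor
  · rintro ⟨i, _, h⟩; exact ⟨i, h⟩
  · rintro ⟨j, h⟩
    by_cases hj : j ≤ msg.length
    · exact ⟨j, by omega, h⟩
    · refine ⟨msg.length, by omega, ?_⟩
      rw [List.drop_eq_nil_of_le (by omega)] at h
      rw [List.drop_length]
      exact h

-- Matched r, unfolded over the concrete table, gives rule r's isIn-disjunction
theorem matched_cases (msg : List Char) (r : Nat) (h : Matched msg r) :
    (r = 0 ∧ (PySem.Chars.isIn "signature".toList msg = true ∨
              PySem.Chars.isIn "cipher".toList msg = true ∨
              PySem.Chars.isIn "extractor".toList msg = true ∨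
              PySem.Chars.isIn "unable to extract".toList msg = true)) ∨
    (r = 1 ∧ PySem.Chars.isIn "ffmpeg".toList msg = true) ∨
    (r = 2 ∧ (PySem.Chars.isIn "javascript runtime".toList msg = true ∨
              PySem.Chars.isIn "js runtime".toList msg = true)) ∨
    (r = 3 ∧ (PySem.Chars.isIn "403".toList msg = true ∨
              PySem.Chars.isIn "forbidden".toList msg = true ∨
              PySem.Chars.isIn "bot".toList msg = true ∨
              PySem.Chars.isIn "sign in".toList msg = true ∨
              PySem.Chars.isIn "age".toList msg = true ∨
              PySem.Chars.isIn "cookie".toList msg = true ∨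
              PySem.Chars.isIn "consent".toList msg = true)) := by
  rcases h with ⟨k, hk, i, hp⟩
  have hin : PySem.Chars.isIn k.toList msg = true := by
    rw [← PySem.Chars.exists_prefix_drop_iff_isIn]; exact ⟨i, hp⟩
  simp only [hintKeywords, List.mem_cons, List.not_mem_nil, or_false, Prod.mk.injEq] at hk
  rcases hk with ⟨h1, h2⟩ | ⟨h1, h2⟩ | ⟨h1, h2⟩ | ⟨h1, h2⟩ | ⟨h1, h2⟩ | ⟨h1, h2⟩ | ⟨h1, h2⟩ |
    ⟨h1, h2⟩ | ⟨h1, h2⟩ | ⟨h1, h2⟩ | ⟨h1, h2⟩ | ⟨h1, h2⟩ | ⟨h1, h2⟩ | ⟨h1, h2⟩ <;>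
    subst h1 <;> subst h2 <;> simp at hin ⊢ <;> simp [hin]

theorem isIn_le_best (msg : List Char) (b : Nat) (k : String) (r : Nat)
    (hm : (k, r) ∈ hintKeywords) (hin : PySem.Chars.isIn k.toList msg = true) :
    ehScan msg (List.range (msg.length + 1)) b ≤ r := by
  rcases (exists_pos_iff_isIn msg k.toList).mpr hin with ⟨i, hi, hp⟩
  exact ehScan_le_of_mem msg _ b i (List.mem_range.mpr hi) k r hm
    ((PySem.Chars.startswith_iff _ _).mpr hp)

theorem matched0 (msg : List Char) (h : Matched msg 0) :
    PySem.Chars.isIn "signature".toList msg = true ∨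
    PySem.Chars.isIn "cipher".toList msg = true ∨
    PySem.Chars.isIn "extractor".toList msg = true ∨
    PySem.Chars.isIn "unable to extract".toList msg = true := by
  rcases matched_cases msg 0 h with ⟨_, hd⟩ | ⟨h', _⟩ | ⟨h', _⟩ | ⟨h', _⟩
  · exact hd
  all_goals omega

theorem matched1 (msg : List Char) (h : Matched msg 1) :
    PySem.Chars.isIn "ffmpeg".toList msg = true := by
  rcases matched_cases msg 1 h with ⟨h', _⟩ | ⟨_, hd⟩ | ⟨h', _⟩ | ⟨h', _⟩
  · omega
  · exact hd
  all_goals omega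

theorem matched2 (msg : List Char) (h : Matched msg 2) :
    PySem.Chars.isIn "javascript runtime".toList msg = true ∨
    PySem.Chars.isIn "js runtime".toList msg = true := by
  rcases matched_cases msg 2 h with ⟨h', _⟩ | ⟨h', _⟩ | ⟨_, hd⟩ | ⟨h', _⟩
  · omega
  · omega
  · exact hd
  · omega

theorem matched3 (msg : List Char) (h : Matched msg 3) :
    PySem.Chars.isIn "403".toList msg = true ∨
    PySem.Chars.isIn "forbidden".toList msg = true ∨
    PySem.Chars.isIn "bot".toList msg = true ∨
    PySem.Chars.isIn "sign in".toList msg = true ∨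
    PySem.Chars.isIn "age".toList msg = true ∨
    PySem.Chars.isIn "cookie".toList msg = true ∨
    PySem.Chars.isIn "consent".toList msg = true := by
  rcases matched_cases msg 3 h with ⟨h', _⟩ | ⟨h', _⟩ | ⟨h', _⟩ | ⟨_, hd⟩
  · omega
  · omega
  · omega
  · exact hd

-- ===== VERDICT (by name: the statement is the Claim_ definition above) =====
theorem error_hint_spec : Claim_equal_error_hint := by
  intro err_text _
  unfold Spec_error_hint
  have halt : error_hint_alt err_text =
      hintTexts.getD (ehScan (PySem.Str.lower err_text).toList
        (List.range ((PySem.Str.lower err_text).toList.length + 1)) 4) "" := rfl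
  rw [halt]
  unfold error_hint
  set msg := (PySem.Str.lower err_text).toList with hmsg
  set best := ehScan msg (List.range (msg.length + 1)) 4 with hbest
  have hup : ∀ (k : String) (r : Nat), (k, r) ∈ hintKeywords →
      PySem.Chars.isIn k.toList msg = true → best ≤ r := fun k r hm hin =>
    isIn_le_best msg 4 k r hm hin
  have hsnd := ehScan_sound msg (List.range (msg.length + 1)) 4
  rw [← hbest] at hsnd
  clear_value best
  clear hbest
  simp only [PySem.Str.isIn_eq, List.any_cons, List.any_nil, Bool.or_false]
  split_ifs with h0 h1 h2 h3
  · simp only [Bool.or_eq_true] at h0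
    have hb : best = 0 := Nat.le_zero.mp (by
      rcases h0 with h | h | h | h
      · exact hup "signature" 0 (by simp [hintKeywords]) h
      · exact hup "cipher" 0 (by simp [hintKeywords]) h
      · exact hup "extractor" 0 (by simp [hintKeywords]) h
      · exact hup "unable to extract" 0 (by simp [hintKeywords]) h)
    simp [hb, hintTexts]
  · have hle : best ≤ 1 := hup "ffmpeg" 1 (by simp [hintKeywords]) h1
    have hne0 : best ≠ 0 := by
      intro h
      rcases hsnd with h4 | hm
      · omega
      · rcases matched0 msg (h ▸ hm) with hd | hd | hd | hd <;> rw [hmsg] at hd <;> simp at hd <;> simp [hd] at h0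
    have hb : best = 1 := by omega
    simp [hb, hintTexts]
  · have hle : best ≤ 2 := by
      rcases Bool.or_eq_true _ _ |>.mp h2 with h | h
      · exact hup "javascript runtime" 2 (by simp [hintKeywords]) h
      · exact hup "js runtime" 2 (by simp [hintKeywords]) h
    have hne0 : best ≠ 0 := by
      intro h
      rcases hsnd with h4 | hm
      · omega
      · rcases matched0 msg (h ▸ hm) with hd | hd | hd | hd <;> rw [hmsg] at hd <;> simp at hd <;> simp [hd] at h0
    have hne1 : best ≠ 1 := by
      intro h
      rcases hsnd with h4 | hm
      · omega
      · exact h1 (matched1 msg (h ▸ hm))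
    have hb : best = 2 := by omega
    simp [hb, hintTexts]
  · simp only [Bool.or_eq_true] at h3
    have hle : best ≤ 3 := by
      rcases h3 with h | h | h | h | h | h | h
      · exact hup "403" 3 (by simp [hintKeywords]) h
      · exact hup "forbidden" 3 (by simp [hintKeywords]) h
      · exact hup "bot" 3 (by simp [hintKeywords]) h
      · exact hup "sign in" 3 (by simp [hintKeywords]) h
      · exact hup "age" 3 (by simp [hintKeywords]) h
      · exact hup "cookie" 3 (by simp [hintKeywords]) h
      · exact hup "consent" 3 (by simp [hintKeywords]) h
    have hne0 : best ≠ 0 := by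
      intro h
      rcases hsnd with h4 | hm
      · omega
      · rcases matched0 msg (h ▸ hm) with hd | hd | hd | hd <;> rw [hmsg] at hd <;> simp at hd <;> simp [hd] at h0
    have hne1 : best ≠ 1 := by
      intro h
      rcases hsnd with h4 | hm
      · omega
      · exact h1 (matched1 msg (h ▸ hm))
    have hne2 : best ≠ 2 := by
      intro h
      rcases hsnd with h4 | hm
      · omega
      · rcases matched2 msg (h ▸ hm) with hd | hd <;> rw [hmsg] at hd <;> simp at hd <;> simp [hd] at h2
    have hb : best = 3 := by omega
    simp [hb, hintTexts]
  · have hb : best = 4 := by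
      rcases hsnd with h4 | hm
      · exact h4
      · exfalso
        have hle : best ≤ 3 := by
          rcases hm with ⟨k, hk, _⟩
          simp only [hintKeywords, List.mem_cons, List.not_mem_nil, or_false,
            Prod.mk.injEq] at hk
          rcases hk with ⟨_, h⟩ | ⟨_, h⟩ | ⟨_, h⟩ | ⟨_, h⟩ | ⟨_, h⟩ | ⟨_, h⟩ | ⟨_, h⟩ |
            ⟨_, h⟩ | ⟨_, h⟩ | ⟨_, h⟩ | ⟨_, h⟩ | ⟨_, h⟩ | ⟨_, h⟩ | ⟨_, h⟩ <;> omega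
        interval_cases best
        · rcases matched0 msg hm with hd | hd | hd | hd <;> rw [hmsg] at hd <;> simp at hd <;> simp [hd] at h0
        · exact h1 (matched1 msg hm)
        · rcases matched2 msg hm with hd | hd <;> rw [hmsg] at hd <;> simp at hd <;> simp [hd] at h2
        · rcases matched3 msg hm with hd | hd | hd | hd | hd | hd | hd <;> rw [hmsg] at hd <;> simp at hd <;> simp [hd] at h3
    simp [hb, hintTexts]
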